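-- pv_equiv track=rewrite | github.com/noamros9/Robots_motion_planning | walk_path.py | get_path_points
-- ===== SOURCE A (Python) =====
-- def get_path_points(best_path, path_len):
--     # return the path points of the turn
--     # remark: we may have fuel only for a part of the the robots, so the other robots will stay in the same place
--     step_index = max(path_len)
--     turn_points = [list(best_path[0])]
--     for j in range(1, step_index+1, 1):
--         point_i = list(best_path[j])
--         for i in range(len(best_path[0])):
--             if path_len[i] < j:
--                 point_i[i] = best_path[path_len[i]][i]
--         turn_points.append(point_i)
--     return turn_points
-- ===== SOURCE B (Python) =====
-- def get_path_points(best_path, path_len):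
--     steps = max(path_len)
--     n = len(best_path[0])
--     if steps < 1:
--         return [list(best_path[0])]
--     # bucket each robot by the step at which it runs out of fuel, with its resting point
--     events = {}
--     for i in range(n):
--         t = max(path_len[i] + 1, 1)
--         if t <= steps:
--             events.setdefault(t, []).append((i, best_path[path_len[i]][i]))
--     turn_points = [list(best_path[0])]
--     patch = {}
--     for j in range(1, steps + 1):
--         for i, v in events.get(j, []):
--             patch[i] = v
--         row = list(best_path[j])
--         for i, v in patch.items():
--             row[i] = v
--         turn_points.append(row)
--     return turn_points
-- ===== Notes on version B (the rewrite author's own statement) =====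
-- stated objective: alternative
-- what changed: B replaces A's per-row freeze scan (copy row j, then for every robot test path_len[i] < j and re-read best_path[path_len[i]][i]) by an event-driven sweep: robots are bucketed once by the step their fuel runs out together with their precomputed resting point, and the walk maintains an accumulated patch dict that is applied to each copied row.
-- outside the precondition, e.g. on get_path_points([[1], [2, 3]], [1]): A returns [[1], [2, 3]], B returns [[1], [2, 3]]; on get_path_points([[], [2]], [1]): A returns [[], [2]], B returns [[], [2]]
import Mathlib
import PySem

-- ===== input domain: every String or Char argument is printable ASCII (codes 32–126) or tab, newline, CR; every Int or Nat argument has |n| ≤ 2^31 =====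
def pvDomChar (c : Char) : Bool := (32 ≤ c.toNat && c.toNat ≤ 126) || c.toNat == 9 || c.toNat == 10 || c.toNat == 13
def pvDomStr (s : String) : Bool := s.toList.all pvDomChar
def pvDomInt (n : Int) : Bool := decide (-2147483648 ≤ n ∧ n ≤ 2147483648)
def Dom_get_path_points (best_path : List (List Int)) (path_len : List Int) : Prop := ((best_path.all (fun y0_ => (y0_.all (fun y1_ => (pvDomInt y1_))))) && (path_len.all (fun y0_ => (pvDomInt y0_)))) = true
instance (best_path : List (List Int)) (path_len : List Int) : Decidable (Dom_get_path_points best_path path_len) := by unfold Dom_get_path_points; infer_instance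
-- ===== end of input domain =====

-- B replaces A's per-row freeze scan by an event-driven sweep: robots are bucketed once by the step their fuel runs out (with their resting point), and an accumulated patch dict is applied to each row; alternative decomposition, same exact values.


-- ===== PORT A =====
def get_path_points (best_path : List (List Int)) (path_len : List Int) : List (List Int) :=
  let step_index := (PySem.List.max? path_len (fun x => x)).getD 0
  let turn_points : List (List Int) := [PySem.List.pyGetD best_path 0 []]
  (PySem.List.pyRange 1 (step_index + 1) 1).foldl
    (fun turn_points j =>
      let point_i := PySem.List.pyGetD best_path j []
      let point_i := (List.range (PySem.List.pyGetD best_path 0 []).length).foldl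
        (fun p (i : Nat) =>
          if PySem.List.pyGetD path_len ((i : Nat) : Int) 0 < j then
            PySem.List.pySetD p ((i : Nat) : Int)
              (PySem.List.pyGetD (PySem.List.pyGetD best_path (PySem.List.pyGetD path_len ((i : Nat) : Int) 0) []) ((i : Nat) : Int) 0)
          else p) point_i
      turn_points ++ [point_i]) turn_points

-- ===== PORT B =====
def get_path_points_alt (best_path : List (List Int)) (path_len : List Int) : List (List Int) :=
  let steps := (PySem.List.max? path_len (fun x => x)).getD 0
  let n := (PySem.List.pyGetD best_path 0 []).length
  if steps < 1 then [PySem.List.pyGetD best_path 0 []]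
  else
    let events : PySem.Dict Int (List (Nat × Int)) := (List.range n).foldl
      (fun ev (i : Nat) =>
        let t := max (PySem.List.pyGetD path_len ((i : Nat) : Int) 0 + 1) 1
        if t ≤ steps then
          PySem.Dict.modify ev t []
            (· ++ [((i : Nat), PySem.List.pyGetD (PySem.List.pyGetD best_path (PySem.List.pyGetD path_len ((i : Nat) : Int) 0) []) ((i : Nat) : Int) 0)])
        else ev)
      PySem.Dict.empty
    ((PySem.List.pyRange 1 (steps + 1) 1).foldl
      (fun (st : List (List Int) × PySem.Dict Nat Int) j =>
        let patch := (PySem.Dict.getD events j []).foldl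
          (fun p (iv : Nat × Int) => PySem.Dict.insert p iv.1 iv.2) st.2
        let row := (PySem.Dict.items patch).foldl
          (fun r (iv : Nat × Int) => PySem.List.pySetD r ((iv.1 : Nat) : Int) iv.2)
          (PySem.List.pyGetD best_path j [])
        (st.1 ++ [row], patch))
      ([PySem.List.pyGetD best_path 0 []], PySem.Dict.empty)).1

-- ===== PRECONDITION & SPEC =====
-- Pre_ excludes inputs on which A raises (empty arguments, too few fuel entries, a step or frozen-fuel row index out
-- of range) and, when max(path_len) >= 1, ragged inputs (rows among best_path[0..max] whose length differs from
-- len(best_path[0])) — a shape outside the function's natural domain (a grid of robot positions per step); both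
-- programs behave alike there and it is excluded only to keep the claim about rectangular grids.
def Pre_get_path_points (best_path : List (List Int)) (path_len : List Int) : Prop :=
  path_len ≠ [] ∧ best_path ≠ [] ∧
  (1 ≤ (PySem.List.max? path_len (fun x => x)).getD 0 →
    (best_path.getD 0 []).length ≤ path_len.length ∧
    (PySem.List.max? path_len (fun x => x)).getD 0 < (best_path.length : Int) ∧
    (∀ row ∈ best_path.take (((PySem.List.max? path_len (fun x => x)).getD 0).toNat + 1),
      row.length = (best_path.getD 0 []).length) ∧
    (∀ i : Nat, i < (best_path.getD 0 []).length →
      path_len.getD i 0 < (PySem.List.max? path_len (fun x => x)).getD 0 →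
      -(best_path.length : Int) ≤ path_len.getD i 0 ∧
      i < (PySem.List.pyGetD best_path (path_len.getD i 0) []).length))
instance (best_path : List (List Int)) (path_len : List Int) : Decidable (Pre_get_path_points best_path path_len) := by unfold Pre_get_path_points; infer_instance
def pvWitness_get_path_points : List (List Int) × List Int := ([[0]], [0])

def Spec_get_path_points (best_path : List (List Int)) (path_len : List Int) (out : List (List Int)) : Prop := out = get_path_points_alt best_path path_len
instance (best_path : List (List Int)) (path_len : List Int) (out : List (List Int)) : Decidable (Spec_get_path_points best_path path_len out) := by unfold Spec_get_path_points; infer_instance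

-- ===== CLAIM (what is proved, stated in full; the proofs are below) =====
def Claim_equal_get_path_points : Prop := ∀ (best_path : List (List Int)) (path_len : List Int), Dom_get_path_points best_path path_len → Pre_get_path_points best_path path_len → Spec_get_path_points best_path path_len (get_path_points best_path path_len)

-- ===== LEMMAS AND PROOFS =====

-- the resting point of robot i: best_path[path_len[i]][i]
def pvFrozen (bp : List (List Int)) (pl : List Int) (i : Nat) : Int :=
  PySem.List.pyGetD (PySem.List.pyGetD bp (PySem.List.pyGetD pl ((i : Nat) : Int) 0) []) ((i : Nat) : Int) 0

-- the step at which robot i runs out of fuel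
def pvKey (pl : List Int) (i : Nat) : Int := max (PySem.List.pyGetD pl ((i : Nat) : Int) 0 + 1) 1

-- the value both programs produce at row k, robot i: best_path[min(k, path_len[i])][i]
def pvSpecRow (bp : List (List Int)) (pl : List Int) (n : Nat) (k : Int) : List Int :=
  (List.range n).map (fun (i : Nat) =>
    PySem.List.pyGetD (PySem.List.pyGetD bp (min k (PySem.List.pyGetD pl ((i : Nat) : Int) 0)) []) ((i : Nat) : Int) 0)

theorem pvSpecRow_getD (bp : List (List Int)) (pl : List Int) (n : Nat) (k : Int) (i : Nat) (hi : i < n) :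
    (pvSpecRow bp pl n k).getD i 0
      = PySem.List.pyGetD (PySem.List.pyGetD bp (min k (PySem.List.pyGetD pl ((i : Nat) : Int) 0)) []) ((i : Nat) : Int) 0 := by
  rw [pvSpecRow, List.getD_eq_getElem _ _ (by simpa using hi)]
  simp

theorem pvSpecRow_length (bp : List (List Int)) (pl : List Int) (n : Nat) (k : Int) :
    (pvSpecRow bp pl n k).length = n := by simp [pvSpecRow]

-- the freezing pass over the first m entries of a row
theorem pv_foldl_set_aux (C : Nat → Prop) [DecidablePred C] (v : Nat → Int) (p : List Int) :
    ∀ m, m ≤ p.length →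
    (List.range m).foldl
      (fun q i => if C i then PySem.List.pySetD q (i : Int) (v i) else q) p
    = (List.range m).map (fun i => if C i then v i else p.getD i 0) ++ p.drop m := by
  intro m
  induction m with
  | zero => simp
  | succ m ih =>
    intro hm
    have hmlt : m < p.length := by omega
    rw [List.range_succ, List.foldl_append, ih (by omega)]
    simp only [List.foldl_cons, List.foldl_nil, List.map_append, List.map_cons, List.map_nil]
    have hlen : ((List.range m).map (fun i => if C i then v i else p.getD i 0)).length = m := by
      simp
    have hdrop : p.drop m = p[m] :: p.drop (m + 1) := List.drop_eq_getElem_cons hmlt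
    split_ifs with hC
    · rw [PySem.List.pySetD_natCast]
      rw [List.set_append_right _ _ (by omega)]
      rw [hlen, Nat.sub_self, hdrop]
      simp [List.set]
    · rw [hdrop]
      simp [List.getD_eq_getElem?_getD, hmlt]

-- the full freezing pass rewrites entry i to v i exactly when C i holds
theorem pv_foldl_set (C : Nat → Prop) [DecidablePred C] (v : Nat → Int) (p : List Int) :
    (List.range p.length).foldl
      (fun q i => if C i then PySem.List.pySetD q (i : Int) (v i) else q) p
    = (List.range p.length).map (fun i => if C i then v i else p.getD i 0) := by
  rw [pv_foldl_set_aux C v p p.length le_rfl]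
  simp

-- A's overwrite pass on row j equals the spec row j (negative fuels included: both sides share the same lookup)
theorem pv_rowA (bp : List (List Int)) (pl : List Int) (n : Nat) (j : Int)
    (hlenrow : (PySem.List.pyGetD bp j []).length = n) :
    (List.range n).foldl
      (fun p (i : Nat) =>
        if PySem.List.pyGetD pl ((i : Nat) : Int) 0 < j then
          PySem.List.pySetD p ((i : Nat) : Int)
            (PySem.List.pyGetD (PySem.List.pyGetD bp (PySem.List.pyGetD pl ((i : Nat) : Int) 0) []) ((i : Nat) : Int) 0)
        else p) (PySem.List.pyGetD bp j [])
    = pvSpecRow bp pl n j := by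
  rw [← hlenrow]
  rw [pv_foldl_set (fun i => PySem.List.pyGetD pl ((i : Nat) : Int) 0 < j)
        (fun i => PySem.List.pyGetD (PySem.List.pyGetD bp (PySem.List.pyGetD pl ((i : Nat) : Int) 0) []) ((i : Nat) : Int) 0)]
  unfold pvSpecRow
  rw [hlenrow]
  apply List.map_congr_left
  intro i hi
  split_ifs with hc
  · rw [min_eq_right (by omega)]
  · rw [min_eq_left (by omega), PySem.List.pyGetD_natCast]

-- a guarded bucket loop is the plain modify loop over the kept, keyed pairs
theorem pv_if_modify_fold (P : Nat → Prop) [DecidablePred P] (key : Nat → Int) (val : Nat → Nat × Int) :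
    ∀ (xs : List Nat) (d : PySem.Dict Int (List (Nat × Int))),
    xs.foldl (fun ev i => if P i then PySem.Dict.modify ev (key i) [] (· ++ [val i]) else ev) d
    = ((xs.filter (fun i => decide (P i))).map (fun i => (key i, val i))).foldl
        (fun d p => PySem.Dict.modify d p.1 [] (· ++ [p.2])) d := by
  intro xs
  induction xs with
  | nil => intro d; simp
  | cons x t ih =>
    intro d
    by_cases hx : P x
    · rw [List.foldl_cons, if_pos hx, List.filter_cons_of_pos (by simpa using hx),
        List.map_cons, List.foldl_cons]
      exact ih _
    · rw [List.foldl_cons, if_neg hx, List.filter_cons_of_neg (by simpa using hx)]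
      exact ih _

-- inserting distinct keyed values: lookup afterwards
theorem pv_get?_insertFold (g : Nat → Int) :
    ∀ (cand : List Nat) (d : PySem.Dict Nat Int) (k : Nat),
    (((cand.map (fun i => (i, g i))).foldl
        (fun p (iv : Nat × Int) => PySem.Dict.insert p iv.1 iv.2) d).get? k)
    = if k ∈ cand then some (g k) else d.get? k := by
  intro cand
  induction cand with
  | nil => intro d k; simp
  | cons c t ih =>
    intro d k
    simp only [List.map_cons, List.foldl_cons]
    rw [ih]
    by_cases hkt : k ∈ t
    · simp [hkt]
    · by_cases hkc : k = c
      · subst hkc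
        simp [hkt, PySem.Dict.get?_insert_self]
      · simp [hkt, hkc, PySem.Dict.get?_insert_of_ne _ _ hkc]

-- applying a patch (distinct indices) to a row: pointwise result
theorem pv_apply_patch_getD (g : Nat → Int) :
    ∀ (K : List Nat) (row : List Int), K.Nodup → ∀ (m : Nat), m < row.length →
    (K.foldl (fun r k => PySem.List.pySetD r ((k : Nat) : Int) (g k)) row).getD m 0
    = if m ∈ K then g m else row.getD m 0 := by
  intro K
  induction K with
  | nil => intro row _ m _; simp
  | cons c t ih =>
    intro row hnd m hm
    rw [List.foldl_cons]
    rw [ih (PySem.List.pySetD row ((c : Nat) : Int) (g c)) hnd.of_cons m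
          (by rw [PySem.List.pySetD_natCast]; simpa using hm)]
    rw [PySem.List.pySetD_natCast]
    by_cases hmt : m ∈ t
    · simp [hmt]
    · by_cases hmc : m = c
      · subst hmc
        simp [hmt, List.getD_eq_getElem?_getD, hm]
      · simp [hmt, hmc, List.getD_eq_getElem?_getD, List.getElem?_set_ne (fun h => hmc h.symm)]

theorem pv_apply_patch_length (g : Nat → Int) :
    ∀ (K : List Nat) (row : List Int),
    (K.foldl (fun r k => PySem.List.pySetD r ((k : Nat) : Int) (g k)) row).length = row.length := by
  intro K
  induction K with
  | nil => intro row; rfl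
  | cons c t ih =>
    intro row
    rw [List.foldl_cons, ih, PySem.List.pySetD_natCast]
    simp

-- B's outer sweep: after m steps the output rows are the spec rows 0..m and the patch holds exactly the
-- robots already out of fuel, mapped to their resting points
theorem pvB_outer (bp : List (List Int)) (pl : List Int) (n : Nat) (M : Int)
    (ev : PySem.Dict Int (List (Nat × Int)))
    (hev : ∀ j : Int, PySem.Dict.getD ev j []
      = ((((List.range n).filter (fun (i : Nat) => decide (max (PySem.List.pyGetD pl ((i : Nat) : Int) 0 + 1) 1 ≤ M))).filter
            (fun (i : Nat) => max (PySem.List.pyGetD pl ((i : Nat) : Int) 0 + 1) 1 == j)).map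
          (fun (i : Nat) => (i, PySem.List.pyGetD (PySem.List.pyGetD bp (PySem.List.pyGetD pl ((i : Nat) : Int) 0) []) ((i : Nat) : Int) 0))))
    (hrow : ∀ k : Nat, k ≤ M.toNat → (PySem.List.pyGetD bp ((k : Nat) : Int) []).length = n)
    (hM : 1 ≤ M) :
    ∀ m : Nat, m ≤ M.toNat →
    ∃ p : PySem.Dict Nat Int,
      ((List.range m).map (fun (k : Nat) => 1 + (k : Int))).foldl
        (fun (st : List (List Int) × PySem.Dict Nat Int) j =>
          (st.1 ++ [(PySem.Dict.items ((PySem.Dict.getD ev j []).foldl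
              (fun p (iv : Nat × Int) => PySem.Dict.insert p iv.1 iv.2) st.2)).foldl
            (fun r (iv : Nat × Int) => PySem.List.pySetD r ((iv.1 : Nat) : Int) iv.2)
            (PySem.List.pyGetD bp j [])],
           (PySem.Dict.getD ev j []).foldl
              (fun p (iv : Nat × Int) => PySem.Dict.insert p iv.1 iv.2) st.2))
        ([PySem.List.pyGetD bp 0 []], PySem.Dict.empty)
      = ([PySem.List.pyGetD bp 0 []] ++ (List.range m).map (fun (k : Nat) => pvSpecRow bp pl n (1 + (k : Int))), p)
      ∧ p.keys.Nodup
      ∧ (∀ i : Nat, p.get? i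
          = if i < n ∧ max (PySem.List.pyGetD pl ((i : Nat) : Int) 0 + 1) 1 ≤ (m : Int) then some (PySem.List.pyGetD (PySem.List.pyGetD bp (PySem.List.pyGetD pl ((i : Nat) : Int) 0) []) ((i : Nat) : Int) 0) else none) := by
  intro m
  induction m with
  | zero =>
    intro _
    refine ⟨PySem.Dict.empty, by simp, PySem.Dict.nodup_keys_empty, ?_⟩
    intro i
    rw [if_neg (by rintro ⟨-, h⟩; omega)]
    simp
  | succ m ih =>
    intro hm
    obtain ⟨p, hfold, hnd, hget⟩ := ih (by omega)
    rw [List.range_succ, List.map_append, List.foldl_append, hfold]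
    simp only [List.map_cons, List.map_nil, List.foldl_cons, List.foldl_nil]
    -- the state after one more step
    have hnd' : ((PySem.Dict.getD ev (1 + (m : Int)) []).foldl (fun p (iv : Nat × Int) => PySem.Dict.insert p iv.1 iv.2) p).keys.Nodup := by
      exact PySem.Dict.nodup_keys_foldl_insert_key _ Prod.fst (fun _ iv => iv.2) p hnd
    have hiff : ∀ i : Nat, i ∈ (((List.range n).filter (fun (i : Nat) => decide (max (PySem.List.pyGetD pl ((i : Nat) : Int) 0 + 1) 1 ≤ M))).filter (fun (i : Nat) => max (PySem.List.pyGetD pl ((i : Nat) : Int) 0 + 1) 1 == 1 + (m : Int)))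
        ↔ (i < n ∧ max (PySem.List.pyGetD pl ((i : Nat) : Int) 0 + 1) 1 ≤ M ∧ max (PySem.List.pyGetD pl ((i : Nat) : Int) 0 + 1) 1 = 1 + (m : Int)) := by
      intro i
      simp only [List.mem_filter, List.mem_range, beq_iff_eq, decide_eq_true_eq]
      tauto
    have hget' : ∀ i : Nat, ((PySem.Dict.getD ev (1 + (m : Int)) []).foldl (fun p (iv : Nat × Int) => PySem.Dict.insert p iv.1 iv.2) p).get? i
        = if i < n ∧ max (PySem.List.pyGetD pl ((i : Nat) : Int) 0 + 1) 1 ≤ ((m + 1 : Nat) : Int) then some (PySem.List.pyGetD (PySem.List.pyGetD bp (PySem.List.pyGetD pl ((i : Nat) : Int) 0) []) ((i : Nat) : Int) 0) else none := by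
      intro i
      rw [hev (1 + (m : Int)), pv_get?_insertFold, hget i]
      by_cases hc : i ∈ (((List.range n).filter (fun (i : Nat) => decide (max (PySem.List.pyGetD pl ((i : Nat) : Int) 0 + 1) 1 ≤ M))).filter (fun (i : Nat) => max (PySem.List.pyGetD pl ((i : Nat) : Int) 0 + 1) 1 == 1 + (m : Int)))
      · rw [if_pos hc]
        obtain ⟨h1, h2, h3⟩ := (hiff i).mp hc
        rw [if_pos ⟨h1, by omega⟩]
      · rw [if_neg hc]
        by_cases hin : i < n
        · by_cases hk : max (PySem.List.pyGetD pl ((i : Nat) : Int) 0 + 1) 1 ≤ (m : Int)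
          · rw [if_pos ⟨hin, hk⟩, if_pos ⟨hin, by push_cast; omega⟩]
          · rw [if_neg (by rintro ⟨-, h⟩; exact hk h), if_neg ?_]
            rintro ⟨-, h⟩
            have hkey1 : max (PySem.List.pyGetD pl ((i : Nat) : Int) 0 + 1) 1 = 1 + (m : Int) := by push_cast at h; omega
            exact hc ((hiff i).mpr ⟨hin, by omega, hkey1⟩)
        · rw [if_neg (by rintro ⟨h, -⟩; exact hin h), if_neg (by rintro ⟨h, -⟩; exact hin h)]
    refine ⟨(PySem.Dict.getD ev (1 + (m : Int)) []).foldl (fun p (iv : Nat × Int) => PySem.Dict.insert p iv.1 iv.2) p, ?_, hnd', hget'⟩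
    show (_ ++ [_], _) = _
    rw [List.map_append, ← List.append_assoc]
    simp only [Prod.mk.injEq]
    refine ⟨?_, trivial⟩
    congr 1
    simp only [List.map_cons, List.map_nil]
    congr 1
    -- the patched row is the spec row 1 + m
    have hlen0 : (PySem.List.pyGetD bp (1 + (m : Int)) []).length = n := by
      have h := hrow (m + 1) hm
      rwa [show ((m + 1 : Nat) : Int) = 1 + (m : Int) by push_cast; ring] at h
    rw [PySem.Dict.items_eq_map_keys _ hnd' 0, List.foldl_map]
    apply List.ext_getElem
    · rw [pv_apply_patch_length, hlen0, pvSpecRow_length]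
    · intro i h1 h2
      rw [← List.getD_eq_getElem _ 0 h1, ← List.getD_eq_getElem _ 0 h2]
      have hi_n : i < n := by rwa [pvSpecRow_length] at h2
      rw [pv_apply_patch_getD _ _ _ hnd' i (by rwa [hlen0])]
      rw [pvSpecRow_getD bp pl n _ i hi_n]
      by_cases hcond : i < n ∧ max (PySem.List.pyGetD pl ((i : Nat) : Int) 0 + 1) 1 ≤ ((m + 1 : Nat) : Int)
      · have hin : i ∈ ((PySem.Dict.getD ev (1 + (m : Int)) []).foldl (fun p (iv : Nat × Int) => PySem.Dict.insert p iv.1 iv.2) p).keys := by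
          by_contra hno
          have := (PySem.Dict.get?_eq_none_iff_not_mem_keys _ _).mpr hno
          rw [hget' i, if_pos hcond] at this
          exact Option.some_ne_none _ this
        rw [if_pos hin]
        rw [PySem.Dict.getD_eq_get?_getD, hget' i, if_pos hcond]
        have hple : PySem.List.pyGetD pl ((i : Nat) : Int) 0 ≤ (m : Int) := by
          have := hcond.2; push_cast at this; omega
        rw [min_eq_right (by omega)]
        rfl
      · have hnotin : i ∉ ((PySem.Dict.getD ev (1 + (m : Int)) []).foldl (fun p (iv : Nat × Int) => PySem.Dict.insert p iv.1 iv.2) p).keys := by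
          intro hmem
          have hne := PySem.Dict.get?_eq_none_iff_not_mem_keys ((PySem.Dict.getD ev (1 + (m : Int)) []).foldl (fun p (iv : Nat × Int) => PySem.Dict.insert p iv.1 iv.2) p) i
          rw [hget' i, if_neg hcond] at hne
          exact (hne.mp rfl) hmem
        rw [if_neg hnotin]
        have hpge : (m : Int) + 1 ≤ PySem.List.pyGetD pl ((i : Nat) : Int) 0 := by
          by_contra hlt
          exact hcond ⟨hi_n, by push_cast; omega⟩
        rw [min_eq_left (by omega), PySem.List.pyGetD_natCast]

-- ===== VERDICT (by name: the statement is the Claim_ definition above) =====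
theorem get_path_points_spec : Claim_equal_get_path_points := by
  intro bp pl _hdom hpre
  obtain ⟨hne, hbpne, hshape⟩ := hpre
  have hbplen : 0 < bp.length := List.length_pos_iff.mpr hbpne
  unfold Spec_get_path_points get_path_points get_path_points_alt
  rcases hmax : PySem.List.max? pl (fun x => x) with _ | M
  · rw [PySem.List.max?_eq_none_iff] at hmax; exact absurd hmax hne
  rw [hmax] at hshape
  simp only [Option.getD_some] at hshape
  rw [show ((some M).getD 0 : Int) = M from rfl]
  dsimp only
  by_cases hM1 : 1 ≤ M
  case neg =>
    rw [PySem.List.pyRange_one_eq_nil (by omega), if_pos (by omega)]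
    simp
  case pos =>
    rw [if_neg (by omega)]
    obtain ⟨hnlen, hSlt, htake, -⟩ := hshape hM1
    set n := (PySem.List.pyGetD bp 0 []).length with hn
    have hrow : ∀ k : Nat, k ≤ M.toNat → (PySem.List.pyGetD bp ((k : Nat) : Int) []).length = n := by
      intro k hk
      rw [PySem.List.pyGetD_natCast]
      have hklen : k < bp.length := by omega
      rw [List.getD_eq_getElem _ _ hklen]
      have hjt : k < (bp.take (M.toNat + 1)).length := by simp; omega
      have hmem : (bp.take (M.toNat + 1))[k] ∈ bp.take (M.toNat + 1) := List.getElem_mem hjt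
      rw [List.getElem_take] at hmem
      have hlen := htake _ hmem
      rw [hn, PySem.List.pyGetD_zero]
      exact hlen
    have hev : ∀ j : Int,
        PySem.Dict.getD ((List.range n).foldl
          (fun ev (i : Nat) =>
            if max (PySem.List.pyGetD pl ((i : Nat) : Int) 0 + 1) 1 ≤ M then
              PySem.Dict.modify ev (max (PySem.List.pyGetD pl ((i : Nat) : Int) 0 + 1) 1) []
                (· ++ [((i : Nat), PySem.List.pyGetD (PySem.List.pyGetD bp (PySem.List.pyGetD pl ((i : Nat) : Int) 0) []) ((i : Nat) : Int) 0)])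
            else ev)
          PySem.Dict.empty) j []
        = ((((List.range n).filter (fun (i : Nat) => decide (max (PySem.List.pyGetD pl ((i : Nat) : Int) 0 + 1) 1 ≤ M))).filter
              (fun (i : Nat) => max (PySem.List.pyGetD pl ((i : Nat) : Int) 0 + 1) 1 == j)).map
            (fun (i : Nat) => (i, PySem.List.pyGetD (PySem.List.pyGetD bp (PySem.List.pyGetD pl ((i : Nat) : Int) 0) []) ((i : Nat) : Int) 0))) := by
      intro j
      rw [pv_if_modify_fold (fun (i : Nat) => max (PySem.List.pyGetD pl ((i : Nat) : Int) 0 + 1) 1 ≤ M)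
            (fun (i : Nat) => max (PySem.List.pyGetD pl ((i : Nat) : Int) 0 + 1) 1)
            (fun (i : Nat) => ((i : Nat), PySem.List.pyGetD (PySem.List.pyGetD bp (PySem.List.pyGetD pl ((i : Nat) : Int) 0) []) ((i : Nat) : Int) 0))]
      rw [PySem.Dict.getD_foldl_modify_append, PySem.Dict.getD_empty, List.nil_append]
      rw [List.filter_map, List.map_map]
      simp only [Function.comp_def]
    have hrng : PySem.List.pyRange 1 (M + 1) 1 = (List.range M.toNat).map (fun (k : Nat) => 1 + (k : Int)) := by
      rw [PySem.List.pyRange_one, show ((M + 1) - 1 : Int) = M from by ring]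
    obtain ⟨p, hfold, -, -⟩ := pvB_outer bp pl n M _ hev hrow hM1 M.toNat le_rfl
    rw [PySem.List.foldl_append_singleton_eq_map]
    conv_lhs => rw [hrng, List.map_map, List.singleton_append]
    rw [hrng, hfold, List.singleton_append]
    congr 1
    apply List.map_congr_left
    intro k hk
    have hkM : k < M.toNat := List.mem_range.mp hk
    simp only [Function.comp_apply]
    apply pv_rowA
    rw [show (1 + (k : Int)) = ((k + 1 : Nat) : Int) from by push_cast; ring]
    exact hrow (k + 1) (by omega)
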